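-- pv_equiv track=rewrite | github.com/yklim1/Ourchord | 01_OPENCV/merge_v2.py | start_list
-- ===== SOURCE A (Python) =====
-- def start_list(staff_average,notelist):
--     m=0
--     num=0
--     startlist = []
--     for i in range(len(notelist)):
--         if(notelist[i][1]>staff_average[m]):
--             m=m+1
--             if(m==len(staff_average)):
--                 if(num==0):
--                     startlist.append(i)
--                     m=len(staff_average)-1
--                     num+1
--                     break
--                 else:
--                     m=len(staff_average)-1
--                     break
--             startlist.append(i)
--     return startlist
-- ===== SOURCE B (Python) =====
-- def start_list(staff_average, notelist):
--     startlist = []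
--     pos = 0
--     for threshold in staff_average:
--         while pos < len(notelist) and not notelist[pos][1] > threshold:
--             pos += 1
--         if pos < len(notelist):
--             startlist.append(pos)
--             pos += 1
--         else:
--             break
--     return startlist
-- ===== Notes on version B (the rewrite author's own statement) =====
-- stated objective: simpler
-- what changed: Replaced A's stateful scan over notelist (threshold index m, dead num flag, nested break logic) by a two-pointer merge that loops over staff_average and advances a note pointer past non-crossing notes, appending one index per threshold.
import Mathlib
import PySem

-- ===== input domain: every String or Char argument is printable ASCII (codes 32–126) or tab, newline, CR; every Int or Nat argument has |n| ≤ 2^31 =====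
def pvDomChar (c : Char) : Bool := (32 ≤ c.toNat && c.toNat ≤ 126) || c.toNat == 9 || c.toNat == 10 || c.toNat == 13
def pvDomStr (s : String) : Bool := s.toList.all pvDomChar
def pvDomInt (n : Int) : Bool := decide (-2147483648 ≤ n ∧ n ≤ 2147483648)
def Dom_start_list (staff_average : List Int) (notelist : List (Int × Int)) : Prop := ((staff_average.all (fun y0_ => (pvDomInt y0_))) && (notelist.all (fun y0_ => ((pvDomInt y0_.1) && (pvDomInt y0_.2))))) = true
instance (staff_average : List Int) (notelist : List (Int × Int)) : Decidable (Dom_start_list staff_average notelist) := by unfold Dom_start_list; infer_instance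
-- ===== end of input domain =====

-- B replaces A's stateful single scan by a two-pointer merge over staff_average (simpler decomposition, same cost).


-- ===== PORT A =====
-- Loop over the remaining notes with the current index i and state (m, num, startlist).
-- staff_average[m] is read with pyGet?; the `none` case is Python's IndexError, excluded by Pre_
-- (the `[]` returned there is never reached under Pre_).
def startListLoopA (staff_average : List Int) :
    List (Int × Int) → Int → Int → Int → List Int → List Int
  | [], _, _, _, acc => acc
  | note :: rest, i, m, num, acc =>
    match PySem.List.pyGet? staff_average m with
    | none => []  -- IndexError in Python; outside Pre_
    | some t =>
      if note.2 > t then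
        if m + 1 = (staff_average.length : Int) then
          if num = 0 then acc ++ [i]          -- append i, then break
          else acc                            -- break (unreachable: num is always 0)
        else startListLoopA staff_average rest (i + 1) (m + 1) num (acc ++ [i])
      else startListLoopA staff_average rest (i + 1) m num acc

def start_list (staff_average : List Int) (notelist : List (Int × Int)) : List Int :=
  startListLoopA staff_average notelist 0 0 0 []

-- ===== PORT B =====
-- advance pos past notes whose pitch does not exceed t, returning the remaining notes and pos
def skipTo (t : Int) : List (Int × Int) → Int → List (Int × Int) × Int
  | [], pos => ([], pos)
  | n :: rest, pos => if n.2 > t then (n :: rest, pos) else skipTo t rest (pos + 1)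

-- for each threshold: skip, then append pos (break if notes exhausted)
def startListLoopB : List Int → List (Int × Int) → Int → List Int
  | [], _, _ => []
  | t :: ts, notes, pos =>
    match skipTo t notes pos with
    | ([], _) => []
    | (_ :: rest, p) => p :: startListLoopB ts rest (p + 1)

def start_list_alt (staff_average : List Int) (notelist : List (Int × Int)) : List Int :=
  startListLoopB staff_average notelist 0

-- ===== PRECONDITION & SPEC =====
-- Pre_ excludes only the inputs where A raises IndexError: a non-empty notelist with empty staff_average.
def Pre_start_list (staff_average : List Int) (notelist : List (Int × Int)) : Prop :=
  notelist = [] ∨ staff_average ≠ []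
instance (staff_average : List Int) (notelist : List (Int × Int)) : Decidable (Pre_start_list staff_average notelist) := by unfold Pre_start_list; infer_instance
def pvWitness_start_list : List Int × (List (Int × Int)) := ([5, 10], [(0, 3), (1, 6), (2, 4), (3, 12)])

def Spec_start_list (staff_average : List Int) (notelist : List (Int × Int)) (out : List Int) : Prop := out = start_list_alt staff_average notelist
instance (staff_average : List Int) (notelist : List (Int × Int)) (out : List Int) : Decidable (Spec_start_list staff_average notelist out) := by unfold Spec_start_list; infer_instance

-- ===== CLAIM (what is proved, stated in full; the proofs are below) =====
def Claim_equal_start_list : Prop := ∀ (staff_average : List Int) (notelist : List (Int × Int)), Dom_start_list staff_average notelist → Pre_start_list staff_average notelist → Spec_start_list staff_average notelist (start_list staff_average notelist)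

-- ===== LEMMAS AND PROOFS =====

-- one step of A's loop, with the threshold lookup resolved
theorem stepA (staff : List Int) (n : Int × Int) (rest : List (Int × Int)) (i m num : Int) (acc : List Int) (t : Int) (hget : PySem.List.pyGet? staff m = some t) :
    startListLoopA staff (n :: rest) i m num acc =
      (if n.2 > t then
        if m + 1 = (staff.length : Int) then
          if num = 0 then acc ++ [i] else acc
        else startListLoopA staff rest (i + 1) (m + 1) num (acc ++ [i])
      else startListLoopA staff rest (i + 1) m num acc) := by
  simp only [startListLoopA, hget]

-- B records the position of a note that crosses the current threshold
theorem stepB_cross (t : Int) (ts : List Int) (n : Int × Int) (rest : List (Int × Int)) (pos : Int) (h : n.2 > t) :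
    startListLoopB (t :: ts) (n :: rest) pos = pos :: startListLoopB ts rest (pos + 1) := by
  simp [startListLoopB, skipTo, h]

-- B skips a note that does not cross the current threshold
theorem stepB_skip (t : Int) (ts : List Int) (n : Int × Int) (rest : List (Int × Int)) (pos : Int) (h : ¬ n.2 > t) :
    startListLoopB (t :: ts) (n :: rest) pos = startListLoopB (t :: ts) rest (pos + 1) := by
  simp [startListLoopB, skipTo, h]

-- Main invariant: A's loop with threshold index k equals acc ++ B's loop on the thresholds from k on.
theorem loopA_eq_loopB (staff : List Int) :
    ∀ (notes : List (Int × Int)) (i : Int) (k : Nat) (acc : List Int),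
      k < staff.length →
      startListLoopA staff notes i (k : Int) 0 acc =
        acc ++ startListLoopB (staff.drop k) notes i := by
  intro notes
  induction notes with
  | nil =>
    intro i k acc hk
    obtain ⟨t, ts, hd⟩ : ∃ t ts, staff.drop k = t :: ts := by
      cases h : staff.drop k with
      | nil => exact absurd (List.drop_eq_nil_iff.mp h) (by omega)
      | cons t ts => exact ⟨t, ts, rfl⟩
    simp [startListLoopA, hd, startListLoopB, skipTo]
  | cons n rest ih =>
    intro i k acc hk
    have hget : PySem.List.pyGet? staff (k : Int) = some staff[k] :=
      PySem.List.pyGet?_natCast staff k ▸ List.getElem?_eq_getElem hk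
    have hd : staff.drop k = staff[k] :: staff.drop (k + 1) := List.drop_eq_getElem_cons hk
    rw [stepA staff n rest i _ 0 acc _ hget, hd]
    by_cases hc : n.2 > staff[k]
    · by_cases hlast : k + 1 = staff.length
      · have hdrop : staff.drop (k + 1) = [] := by simp [hlast]
        rw [if_pos hc, if_pos (show (k : Int) + 1 = (staff.length : Int) by omega), if_pos rfl,
          stepB_cross _ _ _ _ _ hc, hdrop]
        simp [startListLoopB]
      · rw [if_pos hc, if_neg (show ¬ ((k : Int) + 1 = (staff.length : Int)) by omega),
          stepB_cross _ _ _ _ _ hc]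
        have h2 : ((k : Int) + 1) = ((k + 1 : Nat) : Int) := by omega
        rw [h2, ih (i + 1) (k + 1) (acc ++ [i]) (by omega)]
        simp
    · rw [if_neg hc, stepB_skip _ _ _ _ _ hc, ← hd, ih (i + 1) k acc hk]

-- ===== VERDICT (by name: the statement is the Claim_ definition above) =====
theorem start_list_spec : Claim_equal_start_list := by
  intro staff notes _ hpre
  unfold Spec_start_list start_list start_list_alt
  rcases hpre with h | h
  · subst h
    cases staff with
    | nil => rfl
    | cons t ts => simp [startListLoopA, startListLoopB, skipTo]
  · have hlen : 0 < staff.length := List.length_pos_iff.mpr h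
    have := loopA_eq_loopB staff notes 0 0 [] hlen
    simpa using this
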